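-- pv_equiv track=rewrite | github.com/Coreymillia/YouTube-Pi4-StreamMachine | youtube_hat_ui.py | _forecast_high_low
-- ===== SOURCE A (Python) =====
-- def _forecast_high_low(periods):
--     current = periods[0] if periods else {}
--     current_temp = current.get('temperature')
--     if current_temp is None:
--         return (None, None)
--     high = current_temp if current.get('isDaytime') else None
--     low = current_temp if not current.get('isDaytime') else None
--     for period in periods[1:6]:
--         temp = period.get('temperature')
--         if temp is None:
--             continue
--         if period.get('isDaytime') and high is None:
--             high = temp
--         if not period.get('isDaytime') and low is None:
--             low = temp
--         if high is not None and low is not None: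
--             break
--     return (high, low)
-- ===== SOURCE B (Python) =====
-- def _forecast_high_low(periods):
--     if not periods or periods[0].get('temperature') is None:
--         return (None, None)
--     first = {}
--     for p in reversed(periods[:6]):
--         t = p.get('temperature')
--         if t is not None:
--             first[bool(p.get('isDaytime'))] = t
--     return (first.get(True), first.get(False))
-- ===== Notes on version B (the rewrite author's own statement) =====
-- stated objective: alternative
-- what changed: Replaces A's forward fused accumulator loop with early break by a backward pass over periods[:6] that overwrites a dict keyed by the isDaytime flag (so the first matching temperature survives), followed by two dict lookups.
import Mathlib
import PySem

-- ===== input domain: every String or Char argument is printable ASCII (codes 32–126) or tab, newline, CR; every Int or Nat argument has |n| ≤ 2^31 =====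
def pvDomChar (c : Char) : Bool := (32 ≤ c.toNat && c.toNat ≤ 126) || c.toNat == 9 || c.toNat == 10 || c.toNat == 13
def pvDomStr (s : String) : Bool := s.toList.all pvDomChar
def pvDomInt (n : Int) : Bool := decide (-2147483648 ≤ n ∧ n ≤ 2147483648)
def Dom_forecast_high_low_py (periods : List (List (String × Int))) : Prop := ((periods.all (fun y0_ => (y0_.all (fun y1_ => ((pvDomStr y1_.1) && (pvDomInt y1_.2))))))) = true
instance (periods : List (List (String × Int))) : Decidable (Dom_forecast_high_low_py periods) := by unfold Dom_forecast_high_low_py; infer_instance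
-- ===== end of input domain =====

-- B replaces A's forward accumulator loop (with break) by a backward pass over
-- periods[:6] overwriting a dict keyed by the isDaytime flag, then two lookups.

-- ===== PORT A =====
-- dict.get(k): first match in the association list (shared by both ports)
def pvGet (p : List (String × Int)) (k : String) : Option Int :=
  match p with
  | [] => none
  | (k', v) :: rest => if k' == k then some v else pvGet rest k

-- Python truthiness of dict.get's result (ints in this encoding): None and 0 are falsy
def pvTruthy (o : Option Int) : Bool :=
  match o with
  | none => false
  | some v => v != 0

-- the 'for period in periods[1:6]' loop of A, with its early break
def pvLoopA : List (List (String × Int)) → Option Int → Option Int → Option Int × Option Int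
  | [], h, l => (h, l)
  | p :: rest, h, l =>
    match pvGet p "temperature" with
    | none => pvLoopA rest h l
    | some t =>
      let h' := if pvTruthy (pvGet p "isDaytime") && h.isNone then some t else h
      let l' := if !(pvTruthy (pvGet p "isDaytime")) && l.isNone then some t else l
      if h'.isSome && l'.isSome then (h', l') else pvLoopA rest h' l'

def forecast_high_low_py (periods : List (List (String × Int))) : Option Int × Option Int :=
  let current := match periods with | [] => ([] : List (String × Int)) | p :: _ => p
  match pvGet current "temperature" with
  | none => (none, none)
  | some t =>
    let high := if pvTruthy (pvGet current "isDaytime") then some t else none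
    let low := if !(pvTruthy (pvGet current "isDaytime")) then some t else none
    pvLoopA (PySem.List.slice periods (some 1) (some 6)) high low

-- ===== PORT B =====
-- the 'for p in reversed(periods[:6])' loop of Source B, writing first[bool(isDaytime)] = t
def pvLoopB : List (List (String × Int)) → PySem.Dict Bool Int → PySem.Dict Bool Int
  | [], d => d
  | p :: rest, d =>
    match pvGet p "temperature" with
    | none => pvLoopB rest d
    | some t => pvLoopB rest (d.insert (pvTruthy (pvGet p "isDaytime")) t)

def forecast_high_low_py_alt (periods : List (List (String × Int))) : Option Int × Option Int :=
  match periods with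
  | [] => (none, none)
  | p0 :: _ =>
    match pvGet p0 "temperature" with
    | none => (none, none)
    | some _ =>
      let first := pvLoopB (PySem.List.slice periods none (some 6)).reverse PySem.Dict.empty
      (first.get? true, first.get? false)

-- ===== PRECONDITION & SPEC =====
def Spec_forecast_high_low_py (periods : List (List (String × Int))) (out : Option Int × Option Int) : Prop := out = forecast_high_low_py_alt periods
instance (periods : List (List (String × Int))) (out : Option Int × Option Int) : Decidable (Spec_forecast_high_low_py periods out) := by unfold Spec_forecast_high_low_py; infer_instance

-- ===== CLAIM =====
def Claim_equal_forecast_high_low_py : Prop := ∀ (periods : List (List (String × Int))), Dom_forecast_high_low_py periods → Spec_forecast_high_low_py periods (forecast_high_low_py periods)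

-- ===== LEMMAS AND PROOFS =====

-- first-match search over a day-side: the common characterisation both loops reduce to
def pvFind (day : Bool) : List (List (String × Int)) → Option Int
  | [] => none
  | p :: rest =>
    if pvTruthy (pvGet p "isDaytime") == day && (pvGet p "temperature").isSome
    then pvGet p "temperature" else pvFind day rest

-- A's accumulator loop is the pair of first-match searches, each seeded by the accumulator
lemma pvLoopA_eq (rest : List (List (String × Int))) : ∀ h l : Option Int,
    pvLoopA rest h l = (h.or (pvFind true rest), l.or (pvFind false rest)) := by
  induction rest with
  | nil => intro h l; simp [pvLoopA, pvFind]
  | cons p rest ih =>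
    intro h l
    simp only [pvLoopA, pvFind]
    cases ht : pvGet p "temperature" with
    | none => simp [ih]
    | some t =>
      cases hd : pvTruthy (pvGet p "isDaytime") <;> cases h <;> cases l <;>
        simp [ih, Option.or]

lemma pvLoopB_append (a b : List (List (String × Int))) : ∀ d,
    pvLoopB (a ++ b) d = pvLoopB b (pvLoopB a d) := by
  induction a with
  | nil => intro d; rfl
  | cons p rest ih =>
    intro d
    simp only [List.cons_append, pvLoopB]
    cases pvGet p "temperature" <;> simp [ih]

-- B's backward overwrite loop yields the first-match search for each key
lemma pvLoopB_rev_get (l : List (List (String × Int))) : ∀ (d : PySem.Dict Bool Int) (day : Bool),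
    (pvLoopB l.reverse d).get? day = (pvFind day l).or (d.get? day) := by
  induction l with
  | nil => intro d day; simp [pvFind, pvLoopB, Option.or]
  | cons p rest ih =>
    intro d day
    rw [List.reverse_cons, pvLoopB_append]
    simp only [pvLoopB, pvFind]
    cases ht : pvGet p "temperature" with
    | none => simp [ih]
    | some t =>
      rw [PySem.Dict.get?_insert]
      by_cases hd : day = pvTruthy (pvGet p "isDaytime")
      · simp [hd, Option.or]
      · have : (pvTruthy (pvGet p "isDaytime") == day) = false := by
          cases day <;> cases h : pvTruthy (pvGet p "isDaytime") <;> simp_all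
        simp [hd, this, ih]

-- ===== VERDICT =====
theorem forecast_high_low_py_spec : Claim_equal_forecast_high_low_py := by
  intro periods _
  unfold Spec_forecast_high_low_py
  cases periods with
  | nil => rfl
  | cons p0 tl =>
    simp only [forecast_high_low_py, forecast_high_low_py_alt]
    cases ht : pvGet p0 "temperature" with
    | none => rfl
    | some t =>
      have h1 : PySem.List.slice (p0 :: tl) (some 1) (some 6) = tl.take 5 := by
        rw [PySem.List.slice_toNat] <;> norm_num
        rfl
      have h2 : PySem.List.slice (p0 :: tl) none (some 6) = p0 :: tl.take 5 := by
        rw [PySem.List.slice_to] <;> norm_num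
        rfl
      simp only [h1, h2, pvLoopA_eq, pvLoopB_rev_get, pvFind, ht,
        PySem.Dict.get?_empty]
      cases hd : pvTruthy (pvGet p0 "isDaytime") <;> simp [Option.or] <;>
        first
        | (cases pvFind true (tl.take 5) <;> rfl)
        | (cases pvFind false (tl.take 5) <;> rfl)
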